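-- pv_equiv track=rewrite | github.com/Gutiotomas/Analysis-Design-Algorithms | Module_10_Divide_Conquer_1/Problem_C/alexandria_library.py | search
-- ===== SOURCE A (Python) =====
-- def digits_range(start_page, end_page):
--     digit_count = 0
--     current_page = 1
--     digit_length = 1
--
--     while current_page <= end_page:
--         next_page = current_page * 10
--         pages_in_range = min(end_page + 1, next_page) - max(start_page, current_page)
--         if pages_in_range > 0:
--             digit_count += pages_in_range * digit_length
--         current_page = next_page
--         digit_length += 1
--
--     return digit_count
--
-- def search(start_page, end_page, total_digits):
--     previous_digits = digits_range(1, start_page - 1)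
--
--     while start_page <= end_page:
--         mid_page = (start_page + end_page) // 2
--
--         current_digits = previous_digits + digits_range(start_page, mid_page)
--         remaining_digits = total_digits - current_digits
--
--         if current_digits == remaining_digits:
--             return mid_page
--         elif current_digits < remaining_digits:
--             start_page = mid_page + 1
--             previous_digits = current_digits
--         else:
--             end_page = mid_page - 1
--
--     return end_page
-- ===== SOURCE B (Python) =====
-- def digits_upto(n):
--     """Total digits used to print page numbers 1..n."""
--     total = 0
--     lo = 1
--     d = 1
--     while lo <= n:
--         hi = min(n, lo * 10 - 1)
--         total += (hi - lo + 1) * d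
--         lo *= 10
--         d += 1
--     return total
--
--
-- def search(start_page, end_page, total_digits):
--     if start_page > end_page:
--         return end_page
--     run = digits_upto(start_page - 1)
--     c, d = 1, 1
--     while c * 10 <= start_page:
--         c, d = c * 10, d + 1
--     p = start_page
--     while p <= end_page:
--         q = min(c * 10 - 1, end_page)
--         block = run + (q - p + 1) * d
--         if 2 * block < total_digits:
--             run, p = block, q + 1
--             c, d = c * 10, d + 1
--         else:
--             # every page in this decade adds d digits: jump straight to the
--             # first page whose doubled running count reaches total_digits
--             k = (total_digits - 2 * run + 2 * d - 1) // (2 * d)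
--             if k < 1:
--                 k = 1
--             x = p + k - 1
--             return x if 2 * (run + k * d) == total_digits else x - 1
--     return end_page
-- ===== Notes on version B (the rewrite author's own statement) =====
-- stated objective: alternative
-- what changed: Replaced the binary search (which re-sums digit counts with digits_range on every probe) by a single forward decade-by-decade scan that jumps to the balance page inside the deciding decade with one ceiling division; Pre_ restricts to the natural pagination domain (first page >= 1, or an empty range), excluding nonpositive start pages, where A's values are artifacts of digits_range treating pages <= 0 as contributing no digits.
-- outside the precondition, e.g. on search(-5, -5, 0): A returns -5, B returns -6
import Mathlib
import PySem

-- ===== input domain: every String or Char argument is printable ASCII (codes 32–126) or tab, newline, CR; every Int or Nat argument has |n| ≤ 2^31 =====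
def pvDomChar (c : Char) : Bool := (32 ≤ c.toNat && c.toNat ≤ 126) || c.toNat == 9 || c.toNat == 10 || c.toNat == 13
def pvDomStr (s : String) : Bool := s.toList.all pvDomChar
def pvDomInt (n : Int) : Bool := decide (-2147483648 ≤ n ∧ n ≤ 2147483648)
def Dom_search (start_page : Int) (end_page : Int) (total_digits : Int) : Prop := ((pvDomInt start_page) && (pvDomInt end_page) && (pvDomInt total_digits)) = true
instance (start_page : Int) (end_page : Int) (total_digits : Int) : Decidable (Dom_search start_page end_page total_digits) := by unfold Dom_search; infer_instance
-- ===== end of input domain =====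

-- B replaces A's binary search by one forward decade-by-decade scan (alternative algorithm, similar cost).

-- ===== PORT A =====
-- while-loop of digits_range, with a fuel argument (structural recursion) that is
-- never exhausted on the Python-reachable states
def drLoop (s e c d acc : Int) : Nat → Int
  | 0 => acc
  | Nat.succ fuel =>
    if c ≤ e then
      let next := c * 10
      let pages := min (e + 1) next - max s c
      drLoop s e next (d + 1) (if 0 < pages then acc + pages * d else acc) fuel
    else acc

def digits_range (start_page : Int) (end_page : Int) : Int :=
  drLoop start_page end_page 1 1 0 end_page.toNat

def searchLoop (s e t prev : Int) : Nat → Int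
  | 0 => e
  | Nat.succ fuel =>
    if s ≤ e then
      let mid := PySem.Int.floordiv (s + e) 2
      let cur := prev + digits_range s mid
      let rem := t - cur
      if cur = rem then mid
      else if cur < rem then searchLoop (mid + 1) e t cur fuel
      else searchLoop s (mid - 1) t prev fuel
    else e

def search (start_page : Int) (end_page : Int) (total_digits : Int) : Int :=
  searchLoop start_page end_page total_digits (digits_range 1 (start_page - 1))
    (end_page + 1 - start_page).toNat

-- ===== PORT B =====
-- Source B helper digits_upto: total digits used to print pages 1..n (fueled while-loop)
def duLoop (n lo d total : Int) : Nat → Int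
  | 0 => total
  | Nat.succ fuel =>
    if lo ≤ n then
      duLoop n (lo * 10) (d + 1) (total + (min n (lo * 10 - 1) - lo + 1) * d) fuel
    else total

def digits_upto (n : Int) : Int := duLoop n 1 1 0 n.toNat

-- Source B decade-alignment loop 'while c*10 <= start_page' (fueled structural recursion)
def alignLoop (p c d : Int) : Nat → Int × Int
  | 0 => (c, d)
  | Nat.succ fuel => if c * 10 ≤ p then alignLoop p (c * 10) (d + 1) fuel else (c, d)

-- Source B main decade loop 'while p <= end_page' (fueled structural recursion)
def scanLoop (e t p run c d : Int) : Nat → Int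
  | 0 => e
  | Nat.succ fuel =>
    if p ≤ e then
      let q := min (c * 10 - 1) e
      let block := run + (q - p + 1) * d
      if 2 * block < t then
        scanLoop e t (q + 1) block (c * 10) (d + 1) fuel
      else
        let k0 := PySem.Int.floordiv (t - 2 * run + 2 * d - 1) (2 * d)
        let k := if k0 < 1 then 1 else k0
        let x := p + k - 1
        if 2 * (run + k * d) = t then x else x - 1
    else e

def search_alt (start_page : Int) (end_page : Int) (total_digits : Int) : Int :=
  if end_page < start_page then end_page
  else
    let run := digits_upto (start_page - 1)
    let cd := alignLoop start_page 1 1 (start_page - 1).toNat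
    scanLoop end_page total_digits start_page run cd.1 cd.2
      (end_page + 1 - start_page).toNat

-- ===== PRECONDITION & SPEC =====
-- Pre_ restricts to the natural pagination domain: the first page is ≥ 1 (or the range is
-- empty and nothing is printed). On nonpositive start pages A still returns a value, but
-- that value is an artifact of digits_range treating pages ≤ 0 as contributing no digits
-- (several pages "balance" at once and the binary search picks an accidental one).
def Pre_search (start_page : Int) (end_page : Int) (total_digits : Int) : Prop :=
  1 ≤ start_page ∨ end_page < start_page
instance (start_page : Int) (end_page : Int) (total_digits : Int) : Decidable (Pre_search start_page end_page total_digits) := by unfold Pre_search; infer_instance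

def pvWitness_search : Int × Int × Int := (1, 10, 12)

def Spec_search (start_page : Int) (end_page : Int) (total_digits : Int) (out : Int) : Prop := out = search_alt start_page end_page total_digits
instance (start_page : Int) (end_page : Int) (total_digits : Int) (out : Int) : Decidable (Spec_search start_page end_page total_digits out) := by unfold Spec_search; infer_instance

-- ===== CLAIM (what is proved, stated in full; the proofs are below) =====
def Claim_equal_search : Prop := ∀ (start_page : Int) (end_page : Int) (total_digits : Int), Dom_search start_page end_page total_digits → Pre_search start_page end_page total_digits → Spec_search start_page end_page total_digits (search start_page end_page total_digits)

-- ===== LEMMAS AND PROOFS =====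

-- proof-side models of the four loops, defined by well-founded recursion on the
-- loop measure (easier to reason about than the fueled ports; bridged below)
def pvDrLoop (s e c d acc : Int) : Int :=
  if h : 1 ≤ c ∧ c ≤ e then
    let next := c * 10
    let pages := min (e + 1) next - max s c
    pvDrLoop s e next (d + 1) (if 0 < pages then acc + pages * d else acc)
  else acc
termination_by (e + 1 - c).toNat
decreasing_by omega

def pvSearchLoop (s e t prev : Int) : Int :=
  if hse : s ≤ e then
    let mid := PySem.Int.floordiv (s + e) 2
    let cur := prev + digits_range s mid
    let rem := t - cur
    if cur = rem then mid
    else if cur < rem then pvSearchLoop (mid + 1) e t cur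
    else pvSearchLoop s (mid - 1) t prev
  else e
termination_by (e + 1 - s).toNat
decreasing_by
  · have hb := PySem.Int.floordiv_two_mid_bounds hse; omega
  · have hb := PySem.Int.floordiv_two_mid_bounds hse; omega

def pvAlignLoop (p c d : Int) : Int × Int :=
  if h : 1 ≤ c ∧ c * 10 ≤ p then pvAlignLoop p (c * 10) (d + 1) else (c, d)
termination_by (p - c).toNat
decreasing_by omega

def pvScanLoop (e t p run c d : Int) : Int :=
  if h : 1 ≤ c ∧ p < c * 10 ∧ p ≤ e then
    let q := min (c * 10 - 1) e
    let block := run + (q - p + 1) * d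
    if 2 * block < t then
      pvScanLoop e t (q + 1) block (c * 10) (d + 1)
    else
      let k0 := PySem.Int.floordiv (t - 2 * run + 2 * d - 1) (2 * d)
      let k := if k0 < 1 then 1 else k0
      let x := p + k - 1
      if 2 * (run + k * d) = t then x else x - 1
  else e
termination_by (e + 1 - p).toNat
decreasing_by omega


-- f p = total digits printed on pages 1..p
def pvF (p : Int) : Int := digits_range 1 p

-- the value either loop returns: an exact balance page (left disjunct) or the
-- last page whose doubled count is still below the total (right disjunct)
def pvGood (s0 e0 t r : Int) : Prop :=
  (s0 ≤ r ∧ r ≤ e0 ∧ 2 * pvF r = t) ∨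
  (s0 - 1 ≤ r ∧ r ≤ e0 ∧ (∀ p, s0 ≤ p → p ≤ r → 2 * pvF p < t) ∧
    (r < e0 → t < 2 * pvF (r + 1)) ∧ (∀ p, s0 ≤ p → p ≤ e0 → 2 * pvF p ≠ t))

theorem pvDrLoop_eq (s e c d acc : Int) : pvDrLoop s e c d acc =
    if 1 ≤ c ∧ c ≤ e then
      pvDrLoop s e (c * 10) (d + 1)
        (if 0 < min (e + 1) (c * 10) - max s c then acc + (min (e + 1) (c * 10) - max s c) * d else acc)
    else acc := by
  rw [pvDrLoop]
  dsimp only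
  split_ifs <;> rfl

theorem pvDrLoop_acc (n : Nat) (s e c d acc : Int) (hn : (e + 1 - c).toNat = n) :
    pvDrLoop s e c d acc = acc + pvDrLoop s e c d 0 := by
  induction n using Nat.strong_induction_on generalizing c d acc with
  | _ n ih =>
  rw [pvDrLoop_eq s e c d acc, pvDrLoop_eq s e c d 0]
  by_cases h : 1 ≤ c ∧ c ≤ e
  · simp only [if_pos h]
    split_ifs with hp
    · rw [ih (e + 1 - c * 10).toNat (by omega) (c * 10) (d + 1)
            (acc + (min (e + 1) (c * 10) - max s c) * d) rfl,
          ih (e + 1 - c * 10).toNat (by omega) (c * 10) (d + 1)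
            (0 + (min (e + 1) (c * 10) - max s c) * d) rfl]
      ring
    · exact ih (e + 1 - c * 10).toNat (by omega) (c * 10) (d + 1) acc rfl
  · simp [h]

theorem pvDrLoop_stop (s e c d acc : Int) (h : ¬ (1 ≤ c ∧ c ≤ e)) : pvDrLoop s e c d acc = acc := by
  rw [pvDrLoop]; simp [h]

theorem drLoop_bridge (fuel : Nat) (s e c d acc : Int) (hc : 1 ≤ c)
    (hf : (e + 1 - c).toNat ≤ fuel) : drLoop s e c d acc fuel = pvDrLoop s e c d acc := by
  induction fuel generalizing c d acc with
  | zero =>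
    rw [pvDrLoop_stop s e c d acc (by omega)]
    simp only [drLoop]
  | succ n ih =>
    by_cases hce : c ≤ e
    · have hg : 1 ≤ c ∧ c ≤ e := ⟨hc, hce⟩
      simp only [drLoop, if_pos hce]
      rw [pvDrLoop_eq, if_pos hg]
      exact ih (c * 10) (d + 1) _ (by omega) (by omega)
    · simp only [drLoop, if_neg hce]
      rw [pvDrLoop_stop s e c d acc (by omega)]

theorem dr_bridge (s e : Int) : digits_range s e = pvDrLoop s e 1 1 0 :=
  drLoop_bridge e.toNat s e 1 1 0 (by omega) (by omega)

-- Source B's digits_upto computes the same decade sums as A's digits_range with start 1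
theorem duLoop_bridge (fuel : Nat) (n c d acc : Int) (hc : 1 ≤ c)
    (hf : (n + 1 - c).toNat ≤ fuel) : duLoop n c d acc fuel = pvDrLoop 1 n c d acc := by
  induction fuel generalizing c d acc with
  | zero =>
    rw [pvDrLoop_stop 1 n c d acc (by omega)]
    simp only [duLoop]
  | succ m ih =>
    by_cases hcn : c ≤ n
    · simp only [duLoop, if_pos hcn]
      rw [pvDrLoop_eq, if_pos ⟨by omega, hcn⟩,
          if_pos (by omega : 0 < min (n + 1) (c * 10) - max 1 c)]
      have he : acc + (min n (c * 10 - 1) - c + 1) * d =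
          acc + (min (n + 1) (c * 10) - max 1 c) * d := by
        have : min n (c * 10 - 1) - c + 1 = min (n + 1) (c * 10) - max 1 c := by omega
        rw [this]
      rw [he]
      exact ih (c * 10) (d + 1) _ (by omega) (by omega)
    · simp only [duLoop, if_neg hcn]
      rw [pvDrLoop_stop 1 n c d acc (by omega)]

theorem du_eq_pvF (n : Int) : digits_upto n = pvF n := by
  unfold digits_upto pvF digits_range
  rw [duLoop_bridge n.toNat n 1 1 0 (by omega) (by omega),
      drLoop_bridge n.toNat 1 n 1 1 0 (by omega) (by omega)]

def pvPos (y : Int) : Int := if 0 < y then y else 0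

theorem pvPos_nonneg (y : Int) : 0 ≤ pvPos y := by unfold pvPos; split_ifs <;> omega

theorem pvDrLoop_split (s e c d : Int) (hc : 1 ≤ c) (hce : c ≤ e) :
    pvDrLoop s e c d 0 = pvPos (min (e + 1) (c * 10) - max s c) * d + pvDrLoop s e (c * 10) (d + 1) 0 := by
  rw [pvDrLoop_eq, if_pos ⟨hc, hce⟩, pvDrLoop_acc (e + 1 - c * 10).toNat s e (c * 10) (d + 1) _ rfl]
  unfold pvPos; split_ifs <;> ring

theorem pvDrLoop_add (n : Nat) (a m c d : Int) (hn : (m + 1 - c).toNat = n)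
    (hc : 1 ≤ c) (ham : a ≤ m + 1) :
    pvDrLoop 1 (a - 1) c d 0 + pvDrLoop a m c d 0 = pvDrLoop 1 m c d 0 := by
  induction n using Nat.strong_induction_on generalizing c d with
  | _ n ih =>
  by_cases hcm : c ≤ m
  · rw [pvDrLoop_split a m c d hc hcm, pvDrLoop_split 1 m c d hc hcm]
    rw [← ih (m + 1 - c * 10).toNat (by omega) (c * 10) (d + 1) rfl (by omega)]
    by_cases g1 : c ≤ a - 1
    · rw [pvDrLoop_split 1 (a - 1) c d hc g1]
      have key : pvPos (min (a - 1 + 1) (c * 10) - max 1 c) +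
          pvPos (min (m + 1) (c * 10) - max a c) = pvPos (min (m + 1) (c * 10) - max 1 c) := by
        unfold pvPos; split_ifs <;> omega
      linear_combination d * key
    · rw [pvDrLoop_stop 1 (a - 1) c d 0 (by omega),
          pvDrLoop_stop 1 (a - 1) (c * 10) (d + 1) 0 (by omega)]
      have key : pvPos (min (m + 1) (c * 10) - max a c) = pvPos (min (m + 1) (c * 10) - max 1 c) := by
        unfold pvPos; split_ifs <;> omega
      linear_combination d * key
  · rw [pvDrLoop_stop 1 (a - 1) c d 0 (by omega), pvDrLoop_stop a m c d 0 (by omega),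
        pvDrLoop_stop 1 m c d 0 (by omega)]
    ring

theorem pvF_add (a m : Int) (ham : a ≤ m + 1) : pvF (a - 1) + digits_range a m = pvF m := by
  unfold pvF
  rw [dr_bridge 1 (a - 1), dr_bridge a m, dr_bridge 1 m]
  exact pvDrLoop_add (m + 1 - 1).toNat a m 1 1 rfl (by omega) ham

theorem dr_nonneg (s e : Int) : 0 ≤ digits_range s e := by
  have h : ∀ (n : Nat) (c d : Int), (e + 1 - c).toNat = n → 1 ≤ d → 0 ≤ pvDrLoop s e c d 0 := by
    intro n
    induction n using Nat.strong_induction_on with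
    | _ n ih =>
    intro c d hn hd
    by_cases hg : 1 ≤ c ∧ c ≤ e
    · rw [pvDrLoop_split s e c d hg.1 hg.2]
      have h1 := ih (e + 1 - c * 10).toNat (by omega) (c * 10) (d + 1) rfl (by omega)
      have h2 : 0 ≤ pvPos (min (e + 1) (c * 10) - max s c) * d :=
        mul_nonneg (pvPos_nonneg _) (by omega)
      linarith
    · rw [pvDrLoop_stop s e c d 0 hg]
  rw [dr_bridge]
  exact h (e + 1 - 1).toNat 1 1 rfl (by omega)

theorem pvF_step (p : Int) : pvF p = pvF (p - 1) + digits_range p p :=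
  (pvF_add p p (by omega)).symm

theorem pvF_mono (p q : Int) (h : p ≤ q) : pvF p ≤ pvF q := by
  have h1 := pvF_add (p + 1) q (by omega)
  have h2 := dr_nonneg (p + 1) q
  rw [show p + 1 - 1 = p by ring] at h1
  linarith

theorem decade_skip (c d x : Int) (hc : 1 ≤ c) (hx : c * 10 ≤ x) :
    pvDrLoop x x c d 0 = pvDrLoop x x (c * 10) (d + 1) 0 := by
  rw [pvDrLoop_split x x c d hc (by omega)]
  have : pvPos (min (x + 1) (c * 10) - max x c) = 0 := by unfold pvPos; split_ifs <;> omega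
  rw [this]; ring

theorem decade_hit (c d x : Int) (hc : 1 ≤ c) (hx1 : c ≤ x) (hx2 : x < c * 10) :
    pvDrLoop x x c d 0 = d := by
  rw [pvDrLoop_split x x c d hc (by omega)]
  have h1 : pvPos (min (x + 1) (c * 10) - max x c) = 1 := by unfold pvPos; split_ifs <;> omega
  rw [h1, pvDrLoop_stop x x (c * 10) (d + 1) 0 (by omega)]; ring

theorem dr_single_pos (n : Nat) (p c d : Int) (hn : (p + 1 - c).toNat = n)
    (hc : 1 ≤ c) (hcp : c ≤ p) (hd : 1 ≤ d) : 1 ≤ pvDrLoop p p c d 0 := by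
  induction n using Nat.strong_induction_on generalizing c d with
  | _ n ih =>
  by_cases h10 : c * 10 ≤ p
  · rw [decade_skip c d p hc h10]
    exact ih (p + 1 - c * 10).toNat (by omega) (c * 10) (d + 1) rfl (by omega) h10 (by omega)
  · rw [decade_hit c d p hc hcp (by omega)]; omega

theorem pvF_strict (p : Int) (hp : 1 ≤ p) : pvF (p - 1) < pvF p := by
  have h1 : (1:Int) ≤ pvDrLoop p p 1 1 0 := dr_single_pos (p + 1 - 1).toNat p 1 1 rfl (by omega) hp (by omega)
  have h2 := pvF_step p
  rw [dr_bridge p p] at h2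
  omega

theorem pvF_lt (p q : Int) (hpq : p < q) (hq : 1 ≤ q) : pvF p < pvF q := by
  have h1 := pvF_mono p (q - 1) (by omega)
  have h2 := pvF_strict q hq
  omega

def pvPinv (c d : Int) : Prop := ∀ x, c ≤ x → pvDrLoop x x c d 0 = digits_range x x

theorem pvPinv_step (c d : Int) (hc : 1 ≤ c) (h : pvPinv c d) : pvPinv (c * 10) (d + 1) := by
  intro x hx
  rw [← decade_skip c d x hc hx]
  exact h x (by omega)

theorem pvGood_unique (s0 e0 t r1 r2 : Int) (hs1 : 1 ≤ s0) (hse : s0 ≤ e0)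
    (h1 : pvGood s0 e0 t r1) (h2 : pvGood s0 e0 t r2) : r1 = r2 := by
  have keyS : ∀ u v : Int, s0 ≤ u → v ≤ e0 → 2 * pvF u = t → 2 * pvF v = t → u < v → False := by
    intro u v hu hv htu htv hlt
    have := pvF_lt u v hlt (by omega); omega
  have keyN : ∀ u v : Int,
      (u < e0 → t < 2 * pvF (u + 1)) → s0 - 1 ≤ u →
      v ≤ e0 → (∀ p, s0 ≤ p → p ≤ v → 2 * pvF p < t) → u < v → False := by
    intro u v hu4 hu1 hv2 hv3 hlt
    have hfv : 2 * pvF v < t := hv3 v (by omega) (le_refl v)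
    have hup : t < 2 * pvF (u + 1) := hu4 (by omega)
    have := pvF_mono (u + 1) v (by omega)
    omega
  rcases h1 with ⟨ha1, hb1, hc1⟩ | ⟨ha1, hb1, hc1, hd1, he1⟩ <;>
    rcases h2 with ⟨ha2, hb2, hc2⟩ | ⟨ha2, hb2, hc2, hd2, he2⟩
  · rcases lt_trichotomy r1 r2 with hlt | heq | hgt
    · exact absurd (keyS r1 r2 ha1 hb2 hc1 hc2 hlt) (by simp)
    · exact heq
    · exact absurd (keyS r2 r1 ha2 hb1 hc2 hc1 hgt) (by simp)
  · exact absurd hc1 (he2 r1 ha1 hb1)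
  · exact absurd hc2 (he1 r2 ha2 hb2)
  · rcases lt_trichotomy r1 r2 with hlt | heq | hgt
    · exact absurd (keyN r1 r2 hd1 ha1 hb2 hc2 hlt) (by simp)
    · exact heq
    · exact absurd (keyN r2 r1 hd2 ha2 hb1 hc1 hgt) (by simp)

theorem pvSearchLoop_eq (s e t prev : Int) : pvSearchLoop s e t prev =
    if s ≤ e then
      (if prev + digits_range s (PySem.Int.floordiv (s + e) 2) =
          t - (prev + digits_range s (PySem.Int.floordiv (s + e) 2)) then
        PySem.Int.floordiv (s + e) 2
      else if prev + digits_range s (PySem.Int.floordiv (s + e) 2) <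
          t - (prev + digits_range s (PySem.Int.floordiv (s + e) 2)) then
        pvSearchLoop (PySem.Int.floordiv (s + e) 2 + 1) e t
          (prev + digits_range s (PySem.Int.floordiv (s + e) 2))
      else pvSearchLoop s (PySem.Int.floordiv (s + e) 2 - 1) t prev)
    else e := by
  rw [pvSearchLoop]; dsimp only; split_ifs <;> rfl

theorem pvSearchLoop_good (n : Nat) (s0 e0 t s e prev : Int) (hn : (e + 1 - s).toNat = n)
    (hs : s0 ≤ s) (he : e ≤ e0) (hse : s - 1 ≤ e)
    (hprev : prev = pvF (s - 1))
    (hlo : ∀ p, s0 ≤ p → p ≤ s - 1 → 2 * pvF p < t)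
    (hhi : ∀ p, e + 1 ≤ p → p ≤ e0 → t < 2 * pvF p) :
    pvGood s0 e0 t (pvSearchLoop s e t prev) := by
  induction n using Nat.strong_induction_on generalizing s e prev with
  | _ n ih =>
  rw [pvSearchLoop_eq]
  by_cases hse2 : s ≤ e
  · rw [if_pos hse2]
    have hb := PySem.Int.floordiv_two_mid_bounds hse2
    set mid := PySem.Int.floordiv (s + e) 2 with hmid
    have hcur : prev + digits_range s mid = pvF mid := by
      rw [hprev]; exact pvF_add s mid (by omega)
    split_ifs with h1 h2
    · exact Or.inl ⟨by omega, by omega, by linarith⟩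
    · apply ih (e + 1 - (mid + 1)).toNat (by omega) (mid + 1) e (prev + digits_range s mid) rfl
        (by omega) he (by omega)
        (by rw [show mid + 1 - 1 = mid by ring]; exact hcur)
      · intro p hp1 hp2
        by_cases hps : p ≤ s - 1
        · exact hlo p hp1 hps
        · have := pvF_mono p mid (by omega); linarith
      · exact hhi
    · apply ih (mid - 1 + 1 - s).toNat (by omega) s (mid - 1) prev rfl hs (by omega) (by omega) hprev hlo
      intro p hp1 hp2
      by_cases hpe : e + 1 ≤ p
      · exact hhi p hpe hp2
      · have hm := pvF_mono mid p (by omega)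
        have hgt : t < 2 * (prev + digits_range s mid) := by omega
        linarith
  · rw [if_neg hse2]
    refine Or.inr ⟨by omega, he, ?_, ?_, ?_⟩
    · intro p hp1 hp2; exact hlo p hp1 (by omega)
    · intro hlt; exact hhi (e + 1) (by omega) (by omega)
    · intro p hp1 hp2
      by_cases hps : p ≤ s - 1
      · have := hlo p hp1 hps; omega
      · have := hhi p (by omega) hp2; omega

theorem pvPinv_one : pvPinv 1 1 := by
  intro x _; exact (dr_bridge x x).symm

theorem pvAlignLoop_eq (p c d : Int) : pvAlignLoop p c d =
    if 1 ≤ c ∧ c * 10 ≤ p then pvAlignLoop p (c * 10) (d + 1) else (c, d) := by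
  rw [pvAlignLoop]; split_ifs <;> rfl

theorem pvAlignLoop_spec (n : Nat) (p c d : Int) (hn : (p - c).toNat = n)
    (hc : 1 ≤ c) (hcp : c ≤ p) (hd : 1 ≤ d) (hP : pvPinv c d) :
    1 ≤ (pvAlignLoop p c d).1 ∧ (pvAlignLoop p c d).1 ≤ p ∧ p < (pvAlignLoop p c d).1 * 10 ∧
      1 ≤ (pvAlignLoop p c d).2 ∧ pvPinv (pvAlignLoop p c d).1 (pvAlignLoop p c d).2 := by
  induction n using Nat.strong_induction_on generalizing c d with
  | _ n ih =>
  rw [pvAlignLoop_eq]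
  by_cases h : 1 ≤ c ∧ c * 10 ≤ p
  · rw [if_pos h]
    exact ih (p - c * 10).toNat (by omega) (c * 10) (d + 1) rfl (by omega) h.2 (by omega)
      (pvPinv_step c d hc hP)
  · rw [if_neg h]
    exact ⟨hc, hcp, by omega, hd, hP⟩

theorem pvF_affine (j : Nat) (p d : Int)
    (h : ∀ x, p ≤ x → x ≤ p - 1 + j → digits_range x x = d) :
    pvF (p - 1 + j) = pvF (p - 1) + j * d := by
  induction j with
  | zero => simp
  | succ j ih =>
    have hstep := pvF_step (p + j)
    have hdd : digits_range (p + j) (p + j) = d := h (p + j) (by omega) (by push_cast; omega)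
    have ihh := ih (fun x hx1 hx2 => h x hx1 (by push_cast at hx2 ⊢; omega))
    push_cast
    rw [show p - 1 + ((j : Int) + 1) = p + j by ring, hstep, hdd,
        show p + (j : Int) - 1 = p - 1 + j by ring, ihh]
    ring

theorem pvScanLoop_good (n : Nat) (s0 e0 t p run c d : Int) (hn : (e0 + 1 - p).toNat = n)
    (halign : p ≤ e0 → 1 ≤ c ∧ c ≤ p ∧ p < c * 10)
    (hc : 1 ≤ c) (hd : 1 ≤ d) (hP : pvPinv c d)
    (hrun : run = pvF (p - 1)) (hs : s0 ≤ p) (hse : s0 ≤ e0)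
    (hlo : ∀ y, s0 ≤ y → y ≤ p - 1 → 2 * pvF y < t) :
    pvGood s0 e0 t (pvScanLoop e0 t p run c d) := by
  induction n using Nat.strong_induction_on generalizing p run c d with
  | _ n ih =>
  rw [pvScanLoop]; dsimp only
  by_cases hg : 1 ≤ c ∧ p < c * 10 ∧ p ≤ e0
  · rw [dif_pos hg]
    obtain ⟨hc1, hp10, hpe⟩ := hg
    obtain ⟨_, hcp, _⟩ := halign hpe
    set q := min (c * 10 - 1) e0 with hq
    have hqp : p ≤ q := by omega
    have hqe : q ≤ e0 := by omega
    have hdq : ∀ x, p ≤ x → x ≤ q → digits_range x x = d := by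
      intro x hx1 hx2
      rw [← hP x (by omega)]; exact decade_hit c d x hc1 (by omega) (by omega)
    have haff : ∀ x, p - 1 ≤ x → x ≤ q → pvF x = pvF (p - 1) + (x - p + 1) * d := by
      intro x hx1 hx2
      have h0 := pvF_affine (x - p + 1).toNat p d (fun y hy1 hy2 => hdq y hy1 (by omega))
      rw [show ((x - p + 1).toNat : Int) = x - p + 1 by omega,
          show p - 1 + (x - p + 1) = x by ring] at h0
      exact h0
    have hblock : run + (q - p + 1) * d = pvF q := by
      rw [hrun, ← haff q (by omega) (le_refl q)]
    set k0 := PySem.Int.floordiv (t - 2 * run + 2 * d - 1) (2 * d) with hk0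
    set k : Int := if k0 < 1 then 1 else k0 with hk
    have hdpos : (0:Int) < 2 * d := by omega
    have hk1 : 1 ≤ k := by rw [hk]; split_ifs <;> omega
    have hkub : t ≤ 2 * (run + k * d) := by
      rw [hk]; split_ifs with hcl
      · have := (PySem.Int.floordiv_lt_iff_lt_mul (q := 1) hdpos).mp (by rw [← hk0]; omega)
        linarith
      · have := (PySem.Int.floordiv_lt_iff_lt_mul (q := k0 + 1) hdpos).mp (by rw [← hk0]; omega)
        linarith
    have hklb : 2 ≤ k → 2 * (run + (k - 1) * d) < t := by
      intro h2k
      have hke : k = k0 := by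
        rw [hk]; split_ifs with hcl
        · rw [hk] at h2k; simp only [if_pos hcl] at h2k; omega
        · rfl
      have := (PySem.Int.le_floordiv_iff_mul_le (q := k0) hdpos).mp (by rw [← hk0])
      rw [hke]; linarith
    split_ifs with hlt heq
    · -- advance to the next decade
      apply ih (e0 + 1 - (q + 1)).toNat (by omega) (q + 1) (run + (q - p + 1) * d) (c * 10) (d + 1)
        rfl ?_ (by omega) (by omega) (pvPinv_step c d hc1 hP)
        (by rw [show q + 1 - 1 = q by ring]; exact hblock) (by omega) ?_
      · intro hq1e
        refine ⟨by omega, by omega, by omega⟩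
      · intro y hy1 hy2
        by_cases hyp : y ≤ p - 1
        · exact hlo y hy1 hyp
        · have := pvF_mono y q (by omega)
          have hfq : 2 * pvF q < t := by rw [← hblock]; linarith
          linarith
    · -- exact balance page inside this decade
      have hkq : k ≤ q - p + 1 := by
        by_contra hcon
        have h2k : 2 ≤ k := by omega
        have hmin := hklb h2k
        have hdp : (q - p + 1) * d ≤ (k - 1) * d :=
          mul_le_mul_of_nonneg_right (by omega) (by omega)
        linarith
      have hfx : pvF (p + k - 1) = run + k * d := by
        rw [hrun, haff (p + k - 1) (by omega) (by omega)]; ring_nf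
      left
      refine ⟨by omega, by omega, ?_⟩
      rw [hfx]; linarith
    · -- first page that overshoots: previous page is the answer
      have hkq : k ≤ q - p + 1 := by
        by_contra hcon
        have h2k : 2 ≤ k := by omega
        have hmin := hklb h2k
        have hdp : (q - p + 1) * d ≤ (k - 1) * d :=
          mul_le_mul_of_nonneg_right (by omega) (by omega)
        linarith
      have hfx : pvF (p + k - 1) = run + k * d := by
        rw [hrun, haff (p + k - 1) (by omega) (by omega)]; ring_nf
      have hover : t < 2 * pvF (p + k - 1) := by rw [hfx]; omega
      right
      refine ⟨by omega, by omega, ?_, ?_, ?_⟩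
      · intro y hy1 hy2
        by_cases hyp : y ≤ p - 1
        · exact hlo y hy1 hyp
        · have h2k : 2 ≤ k := by omega
          have hmy := pvF_mono y (p + k - 2) (by omega)
          have hfx1 : pvF (p + k - 2) = run + (k - 1) * d := by
            rw [hrun, haff (p + k - 2) (by omega) (by omega)]; ring_nf
          have hmin := hklb h2k
          linarith
      · intro hlt2
        rw [show p + k - 1 - 1 + 1 = p + k - 1 by ring]
        exact hover
      · intro y hy1 hy2
        by_cases hyx : y ≤ p + k - 2
        · by_cases hyp : y ≤ p - 1
          · have := hlo y hy1 hyp; omega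
          · have h2k : 2 ≤ k := by omega
            have hmy := pvF_mono y (p + k - 2) (by omega)
            have hfx1 : pvF (p + k - 2) = run + (k - 1) * d := by
              rw [hrun, haff (p + k - 2) (by omega) (by omega)]; ring_nf
            have hmin := hklb h2k
            have : 2 * pvF y < t := by linarith
            omega
        · have := pvF_mono (p + k - 1) y (by omega)
          omega
  · rw [dif_neg hg]
    have hpe : e0 < p := by
      by_contra hcon
      obtain ⟨x1, x2, x3⟩ := halign (by omega)
      exact hg ⟨x1, x3, by omega⟩
    refine Or.inr ⟨by omega, le_refl e0, ?_, ?_, ?_⟩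
    · intro y hy1 hy2; exact hlo y hy1 (by omega)
    · intro hlt; omega
    · intro y hy1 hy2; have := hlo y hy1 (by omega); omega

theorem searchLoop_bridge (fuel : Nat) (s e t prev : Int) (hf : (e + 1 - s).toNat ≤ fuel) :
    searchLoop s e t prev fuel = pvSearchLoop s e t prev := by
  induction fuel generalizing s e prev with
  | zero =>
    rw [pvSearchLoop_eq, if_neg (by omega)]
    simp only [searchLoop]
  | succ n ih =>
    by_cases hse : s ≤ e
    · have hb := PySem.Int.floordiv_two_mid_bounds hse
      simp only [searchLoop, if_pos hse]
      rw [pvSearchLoop_eq, if_pos hse]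
      split_ifs
      · rfl
      · exact ih (PySem.Int.floordiv (s + e) 2 + 1) e _ (by omega)
      · exact ih s (PySem.Int.floordiv (s + e) 2 - 1) prev (by omega)
    · simp only [searchLoop, if_neg hse]
      rw [pvSearchLoop_eq, if_neg hse]

theorem alignLoop_bridge (fuel : Nat) (p c d : Int) (hc : 1 ≤ c) (hf : (p - c).toNat ≤ fuel) :
    alignLoop p c d fuel = pvAlignLoop p c d := by
  induction fuel generalizing c d with
  | zero =>
    rw [pvAlignLoop_eq, if_neg (by omega)]
    simp only [alignLoop]
  | succ n ih =>
    by_cases h : c * 10 ≤ p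
    · have hg : 1 ≤ c ∧ c * 10 ≤ p := ⟨hc, h⟩
      simp only [alignLoop, if_pos h]
      rw [pvAlignLoop_eq, if_pos hg]
      exact ih (c * 10) (d + 1) (by omega) (by omega)
    · simp only [alignLoop, if_neg h]
      rw [pvAlignLoop_eq, if_neg (by omega)]

theorem scanLoop_bridge (fuel : Nat) (e t p run c d : Int) (hc : 1 ≤ c)
    (halign : p ≤ e → c ≤ p ∧ p < c * 10) (hf : (e + 1 - p).toNat ≤ fuel) :
    scanLoop e t p run c d fuel = pvScanLoop e t p run c d := by
  induction fuel generalizing p run c d with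
  | zero =>
    rw [pvScanLoop]
    rw [dif_neg (by intro hcon; omega)]
    simp only [scanLoop]
  | succ n ih =>
    by_cases hpe : p ≤ e
    · obtain ⟨hcp, hp10⟩ := halign hpe
      simp only [scanLoop, if_pos hpe]
      rw [pvScanLoop]
      dsimp only
      rw [dif_pos ⟨hc, hp10, hpe⟩]
      split_ifs
      · exact ih (min (c * 10 - 1) e + 1) _ (c * 10) (d + 1) (by omega)
          (fun h1 => ⟨by omega, by omega⟩) (by omega)
      all_goals rfl
    · simp only [scanLoop, if_neg hpe]
      rw [pvScanLoop]
      rw [dif_neg (by intro hcon; exact hpe hcon.2.2)]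

theorem search_alt_good (s0 e0 t : Int) (hs1 : 1 ≤ s0) (hse : s0 ≤ e0) :
    pvGood s0 e0 t (search_alt s0 e0 t) := by
  unfold search_alt
  rw [if_neg (by omega)]
  dsimp only
  have hA := pvAlignLoop_spec (s0 - 1).toNat s0 1 1 rfl (by omega) hs1 (by omega) pvPinv_one
  obtain ⟨hA1, hA2, hA3, hA4, hA5⟩ := hA
  rw [alignLoop_bridge (s0 - 1).toNat s0 1 1 (by omega) (by omega)]
  rw [scanLoop_bridge (e0 + 1 - s0).toNat e0 t s0 _ _ _ hA1 (fun _ => ⟨hA2, hA3⟩) (le_refl _)]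
  rw [du_eq_pvF]
  apply pvScanLoop_good (e0 + 1 - s0).toNat s0 e0 t s0 _ _ _ rfl
    (fun _ => ⟨hA1, hA2, hA3⟩) hA1 hA4 hA5 rfl (le_refl s0) hse
  intro y hy1 hy2; omega

-- ===== VERDICT (by name: the statement is the Claim_ definition above) =====
theorem search_spec : Claim_equal_search := by
  intro s0 e0 t _hdom hpre
  unfold Spec_search
  by_cases hse : s0 ≤ e0
  · have hs1 : 1 ≤ s0 := by
      unfold Pre_search at hpre
      rcases hpre with h | h
      · exact h
      · omega
    have hA : pvGood s0 e0 t (search s0 e0 t) := by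
      unfold search
      rw [searchLoop_bridge (e0 + 1 - s0).toNat s0 e0 t _ (le_refl _)]
      exact pvSearchLoop_good _ s0 e0 t s0 e0 _ rfl (le_refl _) (le_refl _) (by omega) rfl
        (by intro p h1 h2; omega) (by intro p h1 h2; omega)
    have hB := search_alt_good s0 e0 t hs1 hse
    exact pvGood_unique s0 e0 t _ _ hs1 hse hA hB
  · unfold search search_alt
    rw [show (e0 + 1 - s0).toNat = 0 by omega, if_pos (by omega : e0 < s0)]
    simp only [searchLoop]
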